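-- pv_equiv track=rewrite | github.com/hyeonhye126/codingtest_hyeonhye | 프로그래머스/0/120956. 옹알이 （1）/옹알이 （1）.py | solution
-- ===== SOURCE A (Python) =====
-- from itertools import permutations
--
-- def solution(babbling):
--     words = ['aya','ye','woo','ma']
--     possible = set()
--
--     for i in range(1, 5):
--         for p in permutations(words, i):
--             possible.add(''.join(p))
--
--     result = sum(1 for b in babbling if b in possible)
--     return result
-- ===== SOURCE B (Python) =====
-- def solution(babbling):
--     # Greedy left-to-right parse: the four sounds have distinct first letters,
--     # so at each position at most one sound can match; each may be used once.
--     first = {'a': 'aya', 'y': 'ye', 'w': 'woo', 'm': 'ma'}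
--
--     def valid(b):
--         if not b:
--             return False
--         used = set()
--         i = 0
--         while i < len(b):
--             w = first.get(b[i])
--             if w is None or w in used or not b.startswith(w, i):
--                 return False
--             used.add(w)
--             i += len(w)
--         return True
--
--     return sum(1 for b in babbling if valid(b))
-- ===== Notes on version B (the rewrite author's own statement) =====
-- stated objective: alternative
-- what changed: B replaces A's precomputed 64-element permutation set (all 1..4-permutations of the four sounds, joined) by a direct greedy left-to-right parse of each babbling, dispatching on the distinct first letters and marking each sound used at most once.
import Mathlib
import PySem

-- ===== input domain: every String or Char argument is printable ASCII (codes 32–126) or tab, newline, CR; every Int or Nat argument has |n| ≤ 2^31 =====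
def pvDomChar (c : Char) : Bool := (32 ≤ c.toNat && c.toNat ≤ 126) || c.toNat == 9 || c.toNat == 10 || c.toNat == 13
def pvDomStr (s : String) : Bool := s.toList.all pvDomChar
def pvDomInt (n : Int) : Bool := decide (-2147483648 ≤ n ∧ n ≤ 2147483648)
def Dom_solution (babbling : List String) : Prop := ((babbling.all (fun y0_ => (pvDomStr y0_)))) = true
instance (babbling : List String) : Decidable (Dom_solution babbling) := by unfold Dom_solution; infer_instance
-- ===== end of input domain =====

-- B replaces A's 64-element permutation set by a greedy left-to-right parse of each babbling (alternative algorithm, same observable cost).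

-- ===== PORT A =====
-- A-side helper: the set `possible` A builds (a closed constant; hoisted from the function body).
def possibleA : PySem.Set String :=
  (PySem.List.pyRange 1 5 1).foldl
    (fun poss i =>
      (PySem.List.permutations ["aya", "ye", "woo", "ma"] i.toNat).foldl
        (fun poss p => PySem.Set.add poss (PySem.Str.join "" p)) poss)
    PySem.Set.empty

def solution (babbling : List String) : Int :=
  babbling.foldl (fun acc b => acc + (if PySem.Set.contains possibleA b then 1 else 0)) 0

-- ===== PORT B =====
-- Greedy parser: dispatch on the first character ('a'→"aya", 'y'→"ye", 'w'→"woo", 'm'→"ma"),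
-- each sound usable at most once (the four Bools are the `used` flags).
def parseB : List Char → Bool → Bool → Bool → Bool → Bool
  | [], _, _, _, _ => true
  | 'a' :: 'y' :: 'a' :: rest, ua, uy, uw, um => !ua && parseB rest true uy uw um
  | 'y' :: 'e' :: rest, ua, uy, uw, um => !uy && parseB rest ua true uw um
  | 'w' :: 'o' :: 'o' :: rest, ua, uy, uw, um => !uw && parseB rest ua uy true um
  | 'm' :: 'a' :: rest, ua, uy, uw, um => !um && parseB rest ua uy uw true
  | _, _, _, _, _ => false

def validB (b : String) : Bool :=
  !b.toList.isEmpty && parseB b.toList false false false false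

def solution_alt (babbling : List String) : Int :=
  babbling.foldl (fun acc b => acc + (if validB b then 1 else 0)) 0

-- ===== PRECONDITION & SPEC =====
def Spec_solution (babbling : List String) (out : Int) : Prop := out = solution_alt babbling
instance (babbling : List String) (out : Int) : Decidable (Spec_solution babbling out) := by unfold Spec_solution; infer_instance

-- ===== CLAIM (what is proved, stated in full; the proofs are below) =====
def Claim_equal_solution : Prop := ∀ (babbling : List String), Dom_solution babbling → Spec_solution babbling (solution babbling)

-- ===== LEMMAS AND PROOFS =====

-- All concatenations of distinct not-yet-used sounds, with fuel = number of unused sounds.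
def genF : Nat → Bool → Bool → Bool → Bool → List (List Char)
  | 0, _, _, _, _ => [[]]
  | n + 1, ua, uy, uw, um =>
    [] :: ((if ua then [] else (genF n true uy uw um).map (['a','y','a'] ++ ·))
        ++ (if uy then [] else (genF n ua true uw um).map (['y','e'] ++ ·))
        ++ (if uw then [] else (genF n ua uy true um).map (['w','o','o'] ++ ·))
        ++ (if um then [] else (genF n ua uy uw true).map (['m','a'] ++ ·)))

def cntF (ua uy uw um : Bool) : Nat :=
  (if ua then 0 else 1) + (if uy then 0 else 1) + (if uw then 0 else 1) + (if um then 0 else 1)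

lemma nil_mem_genF (n : Nat) (ua uy uw um : Bool) : [] ∈ genF n ua uy uw um := by
  cases n <;> simp [genF]

lemma parseB_mem_genF (s : List Char) (ua uy uw um : Bool)
    (h : parseB s ua uy uw um = true) :
    ∀ n, cntF ua uy uw um ≤ n → s ∈ genF n ua uy uw um := by
  induction s, ua, uy, uw, um using parseB.induct with
  | case1 => intro n _; exact nil_mem_genF n _ _ _ _
  | case2 rest ua uy uw um ih =>
    simp only [parseB, Bool.and_eq_true, Bool.not_eq_true'] at h
    intro n hn
    obtain ⟨h1, h2⟩ := h
    subst h1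
    cases n with
    | zero => simp [cntF] at hn
    | succ m =>
      have hm : cntF true uy uw um ≤ m := by simp [cntF] at hn ⊢; omega
      simp [genF]
      exact ih h2 m hm
  | case3 rest ua uy uw um ih =>
    simp only [parseB, Bool.and_eq_true, Bool.not_eq_true'] at h
    intro n hn
    obtain ⟨h1, h2⟩ := h
    subst h1
    cases n with
    | zero => simp [cntF] at hn
    | succ m =>
      have hm : cntF ua true uw um ≤ m := by simp [cntF] at hn ⊢; omega
      simp [genF]
      exact ih h2 m hm
  | case4 rest ua uy uw um ih =>
    simp only [parseB, Bool.and_eq_true, Bool.not_eq_true'] at h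
    intro n hn
    obtain ⟨h1, h2⟩ := h
    subst h1
    cases n with
    | zero => simp [cntF] at hn
    | succ m =>
      have hm : cntF ua uy true um ≤ m := by simp [cntF] at hn ⊢; omega
      simp [genF]
      exact ih h2 m hm
  | case5 rest ua uy uw um ih =>
    simp only [parseB, Bool.and_eq_true, Bool.not_eq_true'] at h
    intro n hn
    obtain ⟨h1, h2⟩ := h
    subst h1
    cases n with
    | zero => simp [cntF] at hn
    | succ m =>
      have hm : cntF ua uy uw true ≤ m := by simp [cntF] at hn ⊢; omega
      simp [genF]
      exact ih h2 m hm
  | case6 s ua uy uw um h1 h2 h3 h4 h5 =>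
    exact absurd h (by simp [parseB])

-- every nonempty word of genF 4 F F F F is in A's set (closed computation)
set_option maxRecDepth 100000 in
lemma genF_sub_possibleA :
    (genF 4 false false false false).all
      (fun l => l.isEmpty || PySem.Set.contains possibleA (String.ofList l)) = true := by
  decide

-- every element of A's set is accepted by B's parser (closed computation)
set_option maxRecDepth 100000 in
lemma possibleA_valid : possibleA.all validB = true := by decide

lemma contains_eq_validB (b : String) :
    PySem.Set.contains possibleA b = validB b := by
  cases hv : validB b with
  | true =>
    have hb := hv
    simp only [validB, Bool.and_eq_true, Bool.not_eq_true'] at hb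
    have hmem : b.toList ∈ genF 4 false false false false :=
      parseB_mem_genF _ _ _ _ _ hb.2 4 (by simp [cntF])
    have := List.all_eq_true.mp genF_sub_possibleA _ hmem
    simp only [hb.1, Bool.false_or] at this
    rw [String.ofList_toList] at this
    exact this
  | false =>
    by_contra hc
    have hc' : PySem.Set.contains possibleA b = true := by
      cases h : PySem.Set.contains possibleA b
      · exact absurd h hc
      · rfl
    have hbmem : b ∈ possibleA := (PySem.Set.contains_iff _ _).mp hc'
    have := List.all_eq_true.mp possibleA_valid _ hbmem
    rw [hv] at this
    exact Bool.false_ne_true this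

-- ===== VERDICT (by name: the statement is the Claim_ definition above) =====
theorem solution_spec : Claim_equal_solution := by
  intro babbling _
  show solution babbling = solution_alt babbling
  unfold solution solution_alt
  have : (fun (acc : Int) (b : String) => acc + (if PySem.Set.contains possibleA b then 1 else 0))
       = (fun (acc : Int) (b : String) => acc + (if validB b then 1 else 0)) := by
    funext acc b
    rw [contains_eq_validB]
  rw [this]
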